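-- pv_equiv track=rewrite | github.com/YonyUk/DAA_FINAL_EXAM | problem2/specific_instances_solutions.py | _transitive_instance_solution
-- ===== SOURCE A (Python) =====
-- def _transitive_instance_solution(robots,crews,relations):
--
--     solution = []
--     crews_taken = []
--     for robot in robots:
--         if len(solution) == 0:
--             solution.append(robot)
--             for crew in crews:
--                 if robot in crew:
--                     crews_taken.append(crew)
--                     break
--                 pass
--             pass
--         elif len(solution) == len(crews):
--             return True
--         else:
--             for crew in crews:
--                 if robot in crew and not crew in crews_taken:
--                     if (solution[0],robot) in relations:
--                         solution.append(robot)
--                         crews_taken.append(crew)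
--                         break
--                     pass
--                 pass
--             pass
--         pass
--     return len(solution) == len(crews)
-- ===== SOURCE B (Python) =====
-- def _transitive_instance_solution(robots, crews, relations):
--     # Single pass over robots with precomputed member_of index, relation set and taken set.
--     if not robots:
--         return len(crews) == 0
--     member_of = {}
--     for crew in crews:
--         t = tuple(crew)
--         seen = set()
--         for x in crew:
--             if x not in seen:
--                 seen.add(x)
--                 member_of.setdefault(x, []).append(t)
--     relset = set(relations)
--     first = robots[0]
--     taken = set()
--     cs = member_of.get(first, [])
--     if cs:
--         taken.add(cs[0])
--     count = 1
--     for robot in robots[1:]: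
--         if count == len(crews):
--             return True
--         if (first, robot) in relset:
--             for c in member_of.get(robot, []):
--                 if c not in taken:
--                     taken.add(c)
--                     count += 1
--                     break
--     return count == len(crews)
-- ===== Notes on version B (the rewrite author's own statement) =====
-- stated objective: faster
-- what changed: Replaces A's per-robot rescans of all crews with list-membership and crews_taken list-containment tests by a precomputed value-to-crews index dict, a relation set and a taken set consulted in a single pass over the robots.
import Mathlib
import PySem

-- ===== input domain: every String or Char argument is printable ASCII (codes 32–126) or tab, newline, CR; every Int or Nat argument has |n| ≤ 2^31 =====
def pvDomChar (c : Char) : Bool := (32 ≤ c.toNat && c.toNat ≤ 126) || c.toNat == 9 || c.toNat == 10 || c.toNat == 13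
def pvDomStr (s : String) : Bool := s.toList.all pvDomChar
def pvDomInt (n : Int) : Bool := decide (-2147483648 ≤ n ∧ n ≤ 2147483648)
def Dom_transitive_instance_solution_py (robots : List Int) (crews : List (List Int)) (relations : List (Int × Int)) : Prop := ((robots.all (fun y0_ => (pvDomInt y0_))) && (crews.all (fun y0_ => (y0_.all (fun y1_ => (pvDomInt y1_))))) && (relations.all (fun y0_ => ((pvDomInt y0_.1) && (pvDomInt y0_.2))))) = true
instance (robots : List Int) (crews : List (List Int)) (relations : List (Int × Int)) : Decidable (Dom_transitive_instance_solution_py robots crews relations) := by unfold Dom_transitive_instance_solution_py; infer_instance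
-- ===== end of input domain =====

-- B replaces A's per-robot scans of all crews (with list-membership tests) by a precomputed
-- value→crews index, a relation set and a taken set, in one pass over the robots.

-- ===== PORT A =====

-- inner 'for crew in crews' loop of the first-robot branch: first crew containing robot
def pvFirstCrewA (robot : Int) : List (List Int) → Option (List Int)
  | [] => none
  | crew :: rest => if robot ∈ crew then some crew else pvFirstCrewA robot rest

-- inner 'for crew in crews' loop of the else branch: returns the crew appended (break), none otherwise
def pvInnerA (robot s0 : Int) (relations : List (Int × Int)) (crews_taken : List (List Int)) :
    List (List Int) → Option (List Int)
  | [] => none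
  | crew :: rest =>
      if robot ∈ crew ∧ crew ∉ crews_taken then
        if (s0, robot) ∈ relations then some crew
        else pvInnerA robot s0 relations crews_taken rest
      else pvInnerA robot s0 relations crews_taken rest

-- the 'for robot in robots' loop, state = (solution, crews_taken)
def pvLoopA (crews : List (List Int)) (relations : List (Int × Int)) :
    List Int → List Int → List (List Int) → Bool
  | [], solution, _ => solution.length == crews.length
  | robot :: rest, solution, crews_taken =>
      if solution.length = 0 then
        let crews_taken' :=
          match pvFirstCrewA robot crews with
          | some crew => crews_taken ++ [crew]
          | none => crews_taken
        pvLoopA crews relations rest (solution ++ [robot]) crews_taken'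
      else if solution.length = crews.length then true
      else
        -- solution[0]: the branch guarantees solution ≠ [], so headI is exact here
        match pvInnerA robot solution.headI relations crews_taken crews with
        | some crew => pvLoopA crews relations rest (solution ++ [robot]) (crews_taken ++ [crew])
        | none => pvLoopA crews relations rest solution crews_taken

def transitive_instance_solution_py (robots : List Int) (crews : List (List Int)) (relations : List (Int × Int)) : Bool :=
  pvLoopA crews relations robots [] []

-- ===== PORT B =====

-- member_of: for each value, the crews containing it, in crews order (dedup per crew via 'seen');
-- Python's setdefault(x, []).append(t) is modelled as insert with the extended list (same getD result)
def pvMemberOf (crews : List (List Int)) : PySem.Dict Int (List (List Int)) :=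
  crews.foldl
    (fun d crew =>
      (crew.foldl
        (fun (st : PySem.Dict Int (List (List Int)) × PySem.Set Int) x =>
          if x ∈ st.2 then st
          else (st.1.insert x (st.1.getD x [] ++ [crew]), PySem.Set.add st.2 x))
        (d, PySem.Set.empty)).1)
    PySem.Dict.empty

-- the 'for robot in robots[1:]' loop of Source B; the inner first-untaken-crew loop is find?
def pvLoopB (crewsLen : Nat) (memberOf : PySem.Dict Int (List (List Int)))
    (relset : PySem.Set (Int × Int)) (first : Int) :
    List Int → Nat → PySem.Set (List Int) → Bool
  | [], count, _ => count == crewsLen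
  | robot :: rest, count, taken =>
      if count = crewsLen then true
      else if (first, robot) ∈ relset then
        match (memberOf.getD robot []).find? (fun c => !(PySem.Set.contains taken c)) with
        | some c => pvLoopB crewsLen memberOf relset first rest (count + 1) (PySem.Set.add taken c)
        | none => pvLoopB crewsLen memberOf relset first rest count taken
      else pvLoopB crewsLen memberOf relset first rest count taken

def transitive_instance_solution_py_alt (robots : List Int) (crews : List (List Int)) (relations : List (Int × Int)) : Bool :=
  match robots with
  | [] => crews.length == 0
  | first :: rest =>
      let memberOf := pvMemberOf crews
      let relset := PySem.Set.ofList relations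
      let taken : PySem.Set (List Int) :=
        match (memberOf.getD first []).head? with
        | some c => PySem.Set.add PySem.Set.empty c
        | none => PySem.Set.empty
      pvLoopB crews.length memberOf relset first rest 1 taken

-- ===== PRECONDITION & SPEC =====
def Spec_transitive_instance_solution_py (robots : List Int) (crews : List (List Int)) (relations : List (Int × Int)) (out : Bool) : Prop := out = transitive_instance_solution_py_alt robots crews relations
instance (robots : List Int) (crews : List (List Int)) (relations : List (Int × Int)) (out : Bool) : Decidable (Spec_transitive_instance_solution_py robots crews relations out) := by unfold Spec_transitive_instance_solution_py; infer_instance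

-- ===== CLAIM (what is proved, stated in full; the proofs are below) =====
def Claim_equal_transitive_instance_solution_py : Prop := ∀ (robots : List Int) (crews : List (List Int)) (relations : List (Int × Int)), Dom_transitive_instance_solution_py robots crews relations → Spec_transitive_instance_solution_py robots crews relations (transitive_instance_solution_py robots crews relations)

-- ===== LEMMAS AND PROOFS =====

-- inner fold of pvMemberOf: appends crew once to every key occurring in l (minus seen)
lemma pvMemberOf_inner (crew : List Int) (v : Int) :
    ∀ (l : List Int) (d : PySem.Dict Int (List (List Int))) (seen : PySem.Set Int),
      ((l.foldl
        (fun (st : PySem.Dict Int (List (List Int)) × PySem.Set Int) x =>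
          if x ∈ st.2 then st
          else (st.1.insert x (st.1.getD x [] ++ [crew]), PySem.Set.add st.2 x))
        (d, seen)).1).getD v [] =
      (if v ∈ l ∧ v ∉ seen then d.getD v [] ++ [crew] else d.getD v []) := by
  intro l
  induction l with
  | nil => intro d seen; simp
  | cons x l ih =>
      intro d seen
      simp only [List.foldl_cons]
      by_cases hx : x ∈ seen
      · simp only [if_pos hx, ih]
        by_cases hv : v = x
        · subst hv
          simp [hx]
        · simp [List.mem_cons, hv]
      · simp only [if_neg hx, ih]
        by_cases hv : v = x
        · subst hv
          have hmem : v ∈ PySem.Set.add seen v := by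
            rw [PySem.Set.mem_add]; right; rfl
          simp [hmem, hx]
        · have hne : (v ∈ PySem.Set.add seen x) ↔ v ∈ seen := by
            rw [PySem.Set.mem_add]
            simp [hv]
          simp [hne, PySem.Dict.getD_insert, hv, List.mem_cons]

-- member_of characterization: member_of[v] = crews containing v, in order
lemma pvMemberOf_getD (crews : List (List Int)) (v : Int) :
    (pvMemberOf crews).getD v [] = crews.filter (fun c => decide (v ∈ c)) := by
  unfold pvMemberOf
  suffices h : ∀ (cs : List (List Int)) (d : PySem.Dict Int (List (List Int))),
      (cs.foldl
        (fun d crew =>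
          (crew.foldl
            (fun (st : PySem.Dict Int (List (List Int)) × PySem.Set Int) x =>
              if x ∈ st.2 then st
              else (st.1.insert x (st.1.getD x [] ++ [crew]), PySem.Set.add st.2 x))
            (d, PySem.Set.empty)).1) d).getD v [] =
      d.getD v [] ++ cs.filter (fun c => decide (v ∈ c)) by
    simpa using h crews PySem.Dict.empty
  intro cs
  induction cs with
  | nil => intro d; simp
  | cons crew cs ih =>
      intro d
      simp only [List.foldl_cons, ih, List.filter_cons]
      have hset : (v ∈ (PySem.Set.empty : PySem.Set Int)) = False := by
        simp [PySem.Set.empty]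
      rw [pvMemberOf_inner]
      by_cases hv : v ∈ crew
      · simp [hv, hset]
      · simp [hv, hset]

-- A's else-branch inner loop: relation check factors out
lemma pvInnerA_eq (robot s0 : Int) (relations : List (Int × Int)) (crews_taken : List (List Int)) :
    ∀ crews : List (List Int),
      pvInnerA robot s0 relations crews_taken crews =
      (if (s0, robot) ∈ relations then
        crews.find? (fun c => decide (robot ∈ c) && !(crews_taken.contains c))
      else none) := by
  intro crews
  induction crews with
  | nil => simp [pvInnerA]
  | cons crew rest ih =>
      by_cases hrel : (s0, robot) ∈ relations
      · by_cases h1 : robot ∈ crew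
        · by_cases h2 : crew ∈ crews_taken
          · simp [pvInnerA, h1, h2, hrel, ih]
          · simp [pvInnerA, h1, h2, hrel, ih]
        · simp [pvInnerA, h1, hrel, ih]
      · simp only [pvInnerA, ih, if_neg hrel]
        split <;> rfl

-- A's first-robot inner loop is find?
lemma pvFirstCrewA_eq (robot : Int) :
    ∀ crews : List (List Int),
      pvFirstCrewA robot crews = crews.find? (fun c => decide (robot ∈ c)) := by
  intro crews
  induction crews with
  | nil => rfl
  | cons crew rest ih =>
      by_cases h : robot ∈ crew <;> simp [pvFirstCrewA, h, ih]

lemma find?_true_eq_head? {α : Type} : ∀ l : List α, l.find? (fun _ => true) = l.head?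
  | [] => rfl
  | _ :: _ => by simp

lemma headI_append_singleton {α : Type} [Inhabited α] (l : List α) (x : α) (h : l ≠ []) :
    (l ++ [x]).headI = l.headI := by
  cases l with
  | nil => exact absurd rfl h
  | cons a t => rfl

-- main loop correspondence
lemma loop_eq (crews : List (List Int)) (relations : List (Int × Int)) (first : Int) :
    ∀ (rest : List Int) (solution : List Int) (crews_taken : List (List Int))
      (count : Nat) (taken : PySem.Set (List Int)),
      solution ≠ [] → solution.headI = first → solution.length = count →
      (∀ c, c ∈ taken ↔ c ∈ crews_taken) →
      pvLoopA crews relations rest solution crews_taken =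
      pvLoopB crews.length (pvMemberOf crews) (PySem.Set.ofList relations) first rest count taken := by
  intro rest
  induction rest with
  | nil =>
      intro solution crews_taken count taken hne hhead hlen hmem
      simp [pvLoopA, pvLoopB, hlen]
  | cons robot rest ih =>
      intro solution crews_taken count taken hne hhead hlen hmem
      have hlen0 : solution.length ≠ 0 := by
        intro h; exact hne (List.length_eq_zero_iff.mp h)
      rw [pvLoopA, pvLoopB]
      rw [if_neg hlen0]
      by_cases hfull : solution.length = crews.length
      · rw [if_pos hfull, if_pos (by omega)]
      · rw [if_neg hfull, if_neg (by omega)]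
        have hcontains : ∀ c : List Int, PySem.Set.contains taken c = crews_taken.contains c := by
          intro c
          have h1 : PySem.Set.contains taken c = decide (c ∈ taken) := by
            simp [PySem.Set.contains_eq_listContains]
          have h2 : crews_taken.contains c = decide (c ∈ crews_taken) := by
            simp
          rw [h1, h2]
          exact decide_eq_decide.mpr (hmem c)
        have hfind :
            ((pvMemberOf crews).getD robot []).find? (fun c => !(PySem.Set.contains taken c)) =
            crews.find? (fun c => decide (robot ∈ c) && !(crews_taken.contains c)) := by
          rw [pvMemberOf_getD, List.find?_filter]
          congr 1
          funext c
          simp [hmem c]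
        rw [pvInnerA_eq, hhead]
        by_cases hrel : (first, robot) ∈ relations
        · have hrel' : (first, robot) ∈ PySem.Set.ofList relations := by
            rw [PySem.Set.mem_ofList]; exact hrel
          rw [if_pos hrel, if_pos hrel', hfind]
          cases hres : crews.find? (fun c => decide (robot ∈ c) && !(crews_taken.contains c)) with
          | none => exact ih solution crews_taken count taken hne hhead hlen hmem
          | some crew =>
              exact ih (solution ++ [robot]) (crews_taken ++ [crew]) (count + 1)
                (PySem.Set.add taken crew) (by simp)
                (by rw [headI_append_singleton _ _ hne]; exact hhead)
                (by simp [hlen])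
                (by intro c
                    rw [PySem.Set.mem_add, List.mem_append, List.mem_singleton, hmem c])
        · have hrel' : ¬ (first, robot) ∈ PySem.Set.ofList relations := by
            simp [PySem.Set.mem_ofList, hrel]
          rw [if_neg hrel, if_neg hrel']
          exact ih solution crews_taken count taken hne hhead hlen hmem

-- ===== VERDICT (by name: the statement is the Claim_ definition above) =====
theorem transitive_instance_solution_py_spec : Claim_equal_transitive_instance_solution_py := by
  intro robots crews relations _
  unfold Spec_transitive_instance_solution_py
  unfold transitive_instance_solution_py transitive_instance_solution_py_alt
  cases robots with
  | nil => simp [pvLoopA, List.length_eq_zero_iff, eq_comm]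
  | cons first rest =>
      rw [pvLoopA]
      simp only [List.length_nil, List.nil_append]
      have hhead : ((pvMemberOf crews).getD first []).head? =
          crews.find? (fun c => decide (first ∈ c)) := by
        rw [pvMemberOf_getD, ← find?_true_eq_head?, List.find?_filter]
        congr 1
        funext c
        simp
      rw [pvFirstCrewA_eq, ← hhead]
      cases hres : ((pvMemberOf crews).getD first []).head? with
      | none =>
          exact loop_eq crews relations first rest [first] [] 1 PySem.Set.empty
            (by simp) rfl rfl (by simp [PySem.Set.empty])
      | some c =>
          apply loop_eq crews relations first rest [first] [c] 1
            (PySem.Set.add PySem.Set.empty c) (by simp) rfl rfl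
          intro c'
          rw [PySem.Set.mem_add]
          simp [PySem.Set.empty]
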